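-- pv_equiv track=rewrite | github.com/Pojzo/codeforces | make_divisible_by_25.py | f
-- ===== SOURCE A (Python) =====
-- def f(x, cur):
--     i = len(x) - 1
--
--     remove = 0
--     while i >= 0 and x[i] != cur[1]:
--         remove += 1
--         i -= 1
--
--     if i < 0:
--         return 999999
--
--     i -= 1
--
--     while i >= 0 and x[i] != cur[0]:
--         i -= 1
--         remove += 1
--
--     if i < 0:
--         return 999999
--
--     return remove
-- ===== SOURCE B (Python) =====
-- def f(x, cur):
--     # Forward DP over removal costs:
--     # d1 = min removals so far such that the kept prefix ends with cur[0]
--     # d2 = min removals so far such that the kept prefix ends with cur[0]cur[1]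
--     d1 = None
--     d2 = None
--     for c in x:
--         nd2 = d2 + 1 if d2 is not None else None
--         if c == cur[1] and d1 is not None:
--             nd2 = d1 if nd2 is None else min(nd2, d1)
--         d1 = 0 if c == cur[0] else (d1 + 1 if d1 is not None else None)
--         d2 = nd2
--     return 999999 if d2 is None else d2
-- ===== Notes on version B (the rewrite author's own statement) =====
-- stated objective: alternative
-- what changed: Replaces A's two backward scans with a mutable removal counter by a single forward left-to-right dynamic program maintaining minimal removal costs for the states 'kept string ends with cur[0]' and 'kept string ends with cur[0]cur[1]'.
import Mathlib
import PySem

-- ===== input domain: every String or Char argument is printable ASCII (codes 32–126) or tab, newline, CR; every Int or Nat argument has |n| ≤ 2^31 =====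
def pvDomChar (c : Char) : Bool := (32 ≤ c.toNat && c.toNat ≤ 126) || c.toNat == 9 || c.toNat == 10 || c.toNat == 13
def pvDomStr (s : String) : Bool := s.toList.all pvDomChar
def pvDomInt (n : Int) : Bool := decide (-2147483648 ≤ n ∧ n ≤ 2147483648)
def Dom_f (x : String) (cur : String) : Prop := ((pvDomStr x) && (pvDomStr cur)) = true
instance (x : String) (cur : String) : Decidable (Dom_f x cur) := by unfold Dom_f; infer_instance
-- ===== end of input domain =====

-- B replaces A's two backward scans (with a mutable removal counter) by a single
-- forward dynamic program over minimal removal costs (objective: alternative).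

-- ===== PORT A =====
-- A's backward while-loop: state is (i, remove); n encodes i+1 (n = 0 ⟺ i < 0).
-- Returns (final i + 1, final remove). Both of A's loops have this exact shape.
def fLoop (xs : List Char) (c : Char) : Nat → Int → Nat × Int
  | 0, remove => (0, remove)
  | n+1, remove =>
    if xs.getD n ' ' ≠ c then fLoop xs c n (remove + 1) else (n + 1, remove)

def f (x : String) (cur : String) : Int :=
  let xs := x.toList
  -- cur[1] / cur[0]: in range whenever the loops run under Pre_f (x = "" otherwise)
  let p := fLoop xs (cur.toList.getD 1 ' ') xs.length 0
  if p.1 = 0 then 999999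
  else
    let q := fLoop xs (cur.toList.getD 0 ' ') (p.1 - 1) p.2
    if q.1 = 0 then 999999 else q.2

-- ===== PORT B =====
-- one step of Source B's loop body; s = (d1, d2), c the current character
def stepB (c0 c1 : Char) (s : Option Int × Option Int) (c : Char) : Option Int × Option Int :=
  let nd2 : Option Int := match s.2 with | none => none | some v => some (v + 1)
  let nd2 : Option Int :=
    if c = c1 then
      match s.1, nd2 with
      | some d1, none => some d1
      | some d1, some v => some (min v d1)
      | none, v => v
    else nd2
  let nd1 : Option Int :=
    if c = c0 then some 0
    else match s.1 with | none => none | some v => some (v + 1)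
  (nd1, nd2)

def f_alt (x : String) (cur : String) : Int :=
  match (x.toList.foldl (stepB (cur.toList.getD 0 ' ') (cur.toList.getD 1 ' ')) (none, none)).2 with
  | none => 999999
  | some v => v

-- ===== PRECONDITION & SPEC =====
-- Pre_f excludes exactly the inputs where Python A raises IndexError: x nonempty
-- with len(cur) < 2 (the loop condition evaluates cur[1] out of range).
def Pre_f (x : String) (cur : String) : Prop := 2 ≤ cur.length ∨ x = ""
instance (x : String) (cur : String) : Decidable (Pre_f x cur) := by unfold Pre_f; infer_instance
def pvWitness_f : String × String := ("1025", "25")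

def Spec_f (x : String) (cur : String) (out : Int) : Prop := out = f_alt x cur
instance (x : String) (cur : String) (out : Int) : Decidable (Spec_f x cur out) := by unfold Spec_f; infer_instance

-- ===== CLAIM (what is proved, stated in full; the proofs are below) =====
def Claim_equal_f : Prop := ∀ (x : String) (cur : String), Dom_f x cur → Pre_f x cur → Spec_f x cur (f x cur)

-- ===== LEMMAS AND PROOFS =====

-- rightmost index j < hi with xs[j] = c (proof-side characterisation shared by both ports)
def rfindBefore (xs : List Char) (c : Char) (hi : Nat) : Option Nat :=
  (((xs.take hi).zipIdx.filter (fun p => p.1 == c)).getLast?).map (fun p => p.2)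

lemma rfindBefore_zero (xs : List Char) (c : Char) : rfindBefore xs c 0 = none := by
  simp [rfindBefore]

lemma rfindBefore_succ (xs : List Char) (c : Char) (n : Nat) (h : n < xs.length) :
    rfindBefore xs c (n+1) =
      if xs.getD n ' ' = c then some n else rfindBefore xs c n := by
  have ht : xs.take (n+1) = xs.take n ++ [xs[n]] := by
    rw [List.take_add_one, List.getElem?_eq_getElem h]; rfl
  have hg : xs.getD n ' ' = xs[n] := by
    simp [List.getD, List.getElem?_eq_getElem h]
  have hlen : (xs.take n).length = n := by
    simp [Nat.le_of_lt h]
  rw [rfindBefore, rfindBefore, ht, hg]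
  rw [List.zipIdx_append, List.filter_append, List.getLast?_append, hlen]
  by_cases hc : xs[n] = c <;> simp [List.zipIdx, hc]

lemma rfindBefore_spec (xs : List Char) (c : Char) :
    ∀ n, n ≤ xs.length → ∀ j, rfindBefore xs c n = some j →
      j < n ∧ xs.getD j ' ' = c := by
  intro n
  induction n with
  | zero => intro _ j hj; rw [rfindBefore_zero] at hj; cases hj
  | succ n ih =>
    intro hle j hj
    rw [rfindBefore_succ xs c n hle] at hj
    by_cases hc : xs.getD n ' ' = c
    · rw [if_pos hc] at hj; cases hj; exact ⟨Nat.lt_succ_self _, hc⟩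
    · rw [if_neg hc] at hj
      obtain ⟨h1, h2⟩ := ih (Nat.le_of_lt hle) j hj
      exact ⟨Nat.lt_succ_of_lt h1, h2⟩

lemma rfindBefore_max (xs : List Char) (c : Char) :
    ∀ n, n ≤ xs.length → ∀ k, k < n → xs.getD k ' ' = c →
      ∃ j, rfindBefore xs c n = some j ∧ k ≤ j := by
  intro n
  induction n with
  | zero => intro _ k hk; omega
  | succ n ih =>
    intro hle k hk hkc
    rw [rfindBefore_succ xs c n hle]
    by_cases hc : xs.getD n ' ' = c
    · exact ⟨n, by rw [if_pos hc], by omega⟩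
    · rw [if_neg hc]
      have hkn : k < n := by
        rcases Nat.lt_succ_iff_lt_or_eq.mp hk with h | h
        · exact h
        · subst h; exact absurd hkc hc
      exact ih (Nat.le_of_lt hle) k hkn hkc

-- characterisation of A's loop by rfindBefore: result index and closed-form count
lemma fLoop_eq (xs : List Char) (c : Char) :
    ∀ n, n ≤ xs.length → ∀ r : Int,
      (fLoop xs c n r = match rfindBefore xs c n with
        | none => (0, r + n)
        | some j => (j + 1, r + n - 1 - j))
      ∧ (∀ j, rfindBefore xs c n = some j → j < n) := by
  intro n
  induction n with
  | zero => intro _ r; simp [fLoop, rfindBefore_zero]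
  | succ n ih =>
    intro hle r
    have hn : n < xs.length := hle
    have ih' := ih (Nat.le_of_lt hn)
    rw [rfindBefore_succ xs c n hn]
    by_cases hc : xs.getD n ' ' = c
    · refine ⟨?_, ?_⟩
      · simp only [fLoop, ne_eq, hc, not_true_eq_false, if_false]
        simp [Prod.ext_iff]; ring
      · intro j hj
        rw [if_pos hc] at hj
        simp only [Option.some.injEq] at hj; omega
    · refine ⟨?_, ?_⟩
      · simp only [fLoop, ne_eq, hc, not_false_eq_true, if_true]
        rw [(ih' (r+1)).1]
        rcases hfind : rfindBefore xs c n with _ | j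
        · simp [Prod.ext_iff]; ring
        · have hjn : j < n := (ih' r).2 j hfind
          simp [Prod.ext_iff]; omega
      · intro j hj
        rw [if_neg hc] at hj
        exact Nat.lt_succ_of_lt ((ih' r).2 j hj)

-- RHS of B's loop invariant, expressed by rfindBefore
def dpState (xs : List Char) (c0 c1 : Char) (n : Nat) : Option Int × Option Int :=
  ((match rfindBefore xs c0 n with
    | none => none
    | some j => some ((n : Int) - 1 - j)),
   (match rfindBefore xs c1 n with
    | none => none
    | some j1 => match rfindBefore xs c0 j1 with
      | none => none
      | some q => some ((n : Int) - 2 - q)))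

-- B's fold over the prefix of length n computes dpState
lemma foldB_inv (xs : List Char) (c0 c1 : Char) :
    ∀ n, n ≤ xs.length →
      (xs.take n).foldl (stepB c0 c1) (none, none) = dpState xs c0 c1 n := by
  intro n
  induction n with
  | zero => simp [dpState, rfindBefore_zero]
  | succ n ih =>
    intro hle
    have hn : n < xs.length := hle
    have ht : xs.take (n+1) = xs.take n ++ [xs[n]] := by
      rw [List.take_add_one, List.getElem?_eq_getElem hn]; rfl
    have hg : xs.getD n ' ' = xs[n] := by
      simp [List.getD, List.getElem?_eq_getElem hn]
    rw [ht, List.foldl_append, ih (Nat.le_of_lt hn)]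
    simp only [List.foldl_cons, List.foldl_nil]
    unfold dpState stepB
    rw [rfindBefore_succ xs c0 n hn, rfindBefore_succ xs c1 n hn, hg]
    by_cases h0 : xs[n] = c0 <;> by_cases h1 : xs[n] = c1
    · -- current char matches both cur[0] and cur[1]
      simp only [if_pos h0, if_pos h1]
      rcases hf0 : rfindBefore xs c0 n with _ | j0
      · rcases hf1 : rfindBefore xs c1 n with _ | j1
        · simp
        · rcases hq : rfindBefore xs c0 j1 with _ | q
          · simp [hq]
          · exfalso
            have hj1 := (rfindBefore_spec xs c1 n (Nat.le_of_lt hn) j1 hf1).1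
            have hqs := rfindBefore_spec xs c0 j1 (by omega) q hq
            obtain ⟨j, hj, _⟩ := rfindBefore_max xs c0 n (Nat.le_of_lt hn) q (by omega) hqs.2
            rw [hf0] at hj; cases hj
      · rcases hf1 : rfindBefore xs c1 n with _ | j1
        · simp; omega
        · rcases hq : rfindBefore xs c0 j1 with _ | q
          · simp [hq]; omega
          · have hj1 := (rfindBefore_spec xs c1 n (Nat.le_of_lt hn) j1 hf1).1
            have hqs := rfindBefore_spec xs c0 j1 (by omega) q hq
            obtain ⟨j, hj, hqj⟩ := rfindBefore_max xs c0 n (Nat.le_of_lt hn) q (by omega) hqs.2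
            rw [hf0] at hj
            have hq0 : q ≤ j0 := by injection hj with hjj; omega
            have hmin : min (↑n - 2 - ↑q + 1 : ℤ) (↑n - 1 - ↑j0) = (↑n - 1 - ↑j0 : ℤ) :=
              min_eq_right (by omega)
            simp [hq, hmin]
            try omega
    · -- matches cur[0] only
      simp only [if_pos h0, if_neg h1]
      rcases hf0 : rfindBefore xs c0 n with _ | j0 <;>
        rcases hf1 : rfindBefore xs c1 n with _ | j1
      · simp
      · rcases hq : rfindBefore xs c0 j1 with _ | q <;> simp [hq] <;> try omega
      · simp
        try omega
      · rcases hq : rfindBefore xs c0 j1 with _ | q <;> simp [hq] <;> try omega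
    · -- matches cur[1] only
      simp only [if_neg h0, if_pos h1]
      rcases hf0 : rfindBefore xs c0 n with _ | j0
      · rcases hf1 : rfindBefore xs c1 n with _ | j1
        · simp
        · rcases hq : rfindBefore xs c0 j1 with _ | q
          · simp [hq]
          · exfalso
            have hj1 := (rfindBefore_spec xs c1 n (Nat.le_of_lt hn) j1 hf1).1
            have hqs := rfindBefore_spec xs c0 j1 (by omega) q hq
            obtain ⟨j, hj, _⟩ := rfindBefore_max xs c0 n (Nat.le_of_lt hn) q (by omega) hqs.2
            rw [hf0] at hj; cases hj
      · rcases hf1 : rfindBefore xs c1 n with _ | j1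
        · simp; omega
        · rcases hq : rfindBefore xs c0 j1 with _ | q
          · simp [hq]; omega
          · have hj1 := (rfindBefore_spec xs c1 n (Nat.le_of_lt hn) j1 hf1).1
            have hqs := rfindBefore_spec xs c0 j1 (by omega) q hq
            obtain ⟨j, hj, hqj⟩ := rfindBefore_max xs c0 n (Nat.le_of_lt hn) q (by omega) hqs.2
            rw [hf0] at hj
            have hq0 : q ≤ j0 := by injection hj with hjj; omega
            have hmin : min (↑n - 2 - ↑q + 1 : ℤ) (↑n - 1 - ↑j0) = (↑n - 1 - ↑j0 : ℤ) :=
              min_eq_right (by omega)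
            simp [hq, hmin]
            try omega
    · -- matches neither
      simp only [if_neg h0, if_neg h1]
      rcases hf0 : rfindBefore xs c0 n with _ | j0 <;>
        rcases hf1 : rfindBefore xs c1 n with _ | j1
      · simp
      · rcases hq : rfindBefore xs c0 j1 with _ | q <;> simp [hq] <;> try omega
      · simp
        try omega
      · rcases hq : rfindBefore xs c0 j1 with _ | q <;> simp [hq] <;> try omega

-- ===== VERDICT (by name: the statement is the Claim_ definition above) =====
theorem f_spec : Claim_equal_f := by
  intro x cur _ _
  unfold Spec_f f f_alt
  dsimp only
  set xs := x.toList with hxs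
  set c0 := cur.toList.getD 0 ' '
  set c1 := cur.toList.getD 1 ' '
  have hB : xs.foldl (stepB c0 c1) (none, none) = dpState xs c0 c1 xs.length := by
    have := foldB_inv xs c0 c1 xs.length (le_refl _)
    rwa [List.take_length] at this
  rw [hB]
  unfold dpState
  have h1 := fLoop_eq xs c1 xs.length (le_refl _) 0
  rcases hf1 : rfindBefore xs c1 xs.length with _ | j1
  · rw [hf1] at h1; rw [h1.1]; simp
  · rw [hf1] at h1
    have hj1 : j1 < xs.length := h1.2 j1 rfl
    rw [h1.1]
    simp only
    rw [if_neg (by omega : ¬ (j1 + 1 = 0))]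
    have h2 := fLoop_eq xs c0 j1 (Nat.le_of_lt hj1) ((0 : Int) + xs.length - 1 - j1)
    have hsub : j1 + 1 - 1 = j1 := by omega
    rw [hsub]
    rcases hf2 : rfindBefore xs c0 j1 with _ | j0
    · rw [hf2] at h2; rw [h2.1]; simp
    · rw [hf2] at h2
      have hj0 : j0 < j1 := h2.2 j0 rfl
      rw [h2.1]
      simp only
      rw [if_neg (by omega : ¬ (j0 + 1 = 0))]
      omega
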